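-- pv_equiv track=rewrite | github.com/kearn77/python-line-formatter | project_scripts/get_nodes.py | model_lines
-- ===== SOURCE A (Python) =====
-- def model_lines(src: list[str]) -> list[tuple]:
--     index_list = []
--     for index, _ in enumerate(src):
--         if index + 1 < len(src):
--             index_list.append((index, index+1))
--         else:
--             index_list.append((index, None))
--
--     return index_list
-- ===== SOURCE B (Python) =====
-- def model_lines(src: list[str]) -> list[tuple]:
--     out = []
--     succ = None
--     for i in range(len(src) - 1, -1, -1):
--         out.append((i, succ))
--         succ = i
--     out.reverse()
--     return out
-- ===== Notes on version B (the rewrite author's own statement) =====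
-- stated objective: alternative
-- what changed: Builds the result back-to-front: a reversed index loop carries the successor index in an accumulator (None initially), appending (i, succ) and updating succ = i, then reverses the list — eliminating A's forward enumerate loop with its per-element length comparison and if/else branch.
import Mathlib
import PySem

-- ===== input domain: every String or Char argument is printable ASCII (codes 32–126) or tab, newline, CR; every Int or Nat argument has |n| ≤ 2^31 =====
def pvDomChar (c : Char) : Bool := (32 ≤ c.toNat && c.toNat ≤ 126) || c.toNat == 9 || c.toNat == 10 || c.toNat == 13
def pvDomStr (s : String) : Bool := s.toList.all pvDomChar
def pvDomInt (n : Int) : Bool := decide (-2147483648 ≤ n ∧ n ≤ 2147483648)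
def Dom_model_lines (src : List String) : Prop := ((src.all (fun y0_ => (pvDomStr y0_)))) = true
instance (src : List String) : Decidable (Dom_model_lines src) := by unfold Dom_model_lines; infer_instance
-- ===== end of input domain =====

-- B builds the list back-to-front with a successor accumulator (no per-element branch) and
-- reverses it at the end, instead of A's forward enumerate loop with an if/else (alternative; same O(n)).

-- ===== PORT A =====
def model_lines (src : List String) : List (Int × Option Int) :=
  (PySem.List.enumerate src).foldl
    (fun acc p =>
      acc ++ [if p.1 + 1 < (src.length : Int) then (p.1, some (p.1 + 1)) else (p.1, none)]) []

-- ===== PORT B =====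
def model_lines_alt (src : List String) : List (Int × Option Int) :=
  (((PySem.List.pyRange ((src.length : Int) - 1) (-1) (-1)).foldl
      (fun (st : List (Int × Option Int) × Option Int) i => (st.1 ++ [(i, st.2)], some i))
      ([], none)).1).reverse

-- ===== PRECONDITION & SPEC =====
def Spec_model_lines (src : List String) (out : List (Int × Option Int)) : Prop := out = model_lines_alt src
instance (src : List String) (out : List (Int × Option Int)) : Decidable (Spec_model_lines src out) := by unfold Spec_model_lines; infer_instance

-- ===== CLAIM (what is proved, stated in full; the proofs are below) =====
def Claim_equal_model_lines : Prop := ∀ (src : List String), Dom_model_lines src → Spec_model_lines src (model_lines src)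

-- ===== LEMMAS AND PROOFS =====

-- the pair list B's fold produces, described structurally
def pvPairs (s : Option Int) : List Int → List (Int × Option Int)
  | [] => []
  | i :: t => (i, s) :: pvPairs (some i) t

lemma pvFold_eq_pairs (l : List Int) : ∀ (acc : List (Int × Option Int)) (s : Option Int),
    (l.foldl (fun (st : List (Int × Option Int) × Option Int) i => (st.1 ++ [(i, st.2)], some i)) (acc, s)).1
      = acc ++ pvPairs s l := by
  induction l with
  | nil => intro acc s; simp [pvPairs]
  | cons i t ih => intro acc s; simp [List.foldl, pvPairs, ih]

-- reversed pairs over the countdown range = the ascending successor list, last paired with s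
lemma pvPairs_countdown : ∀ (n : Nat) (s : Option Int),
    (pvPairs s (PySem.List.pyRange ((n : Int) - 1) (-1) (-1))).reverse =
      (PySem.List.pyRange 0 ((n : Int) - 1) 1).map (fun i => (i, some (i + 1)))
        ++ (if n = 0 then [] else [((n : Int) - 1, s)]) := by
  intro n
  induction n with
  | zero =>
      intro s
      rw [PySem.List.pyRange_neg_one_eq_nil (by omega)]
      simp [pvPairs]
  | succ n ih =>
      intro s
      rw [PySem.List.pyRange_neg_one_cons (by push_cast; omega)]
      have h1 : ((n + 1 : Nat) : Int) - 1 - 1 = (n : Int) - 1 := by push_cast; omega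
      rw [show (((n + 1 : Nat) : Int) - 1 - 1) = ((n : Int) - 1) from h1]
      simp only [pvPairs, List.reverse_cons]
      rw [ih (some (((n + 1 : Nat) : Int) - 1))]
      by_cases hn : n = 0
      · subst hn
        simp
      · have hrange : PySem.List.pyRange 0 (((n + 1 : Nat) : Int) - 1) 1 =
            PySem.List.pyRange 0 ((n : Int) - 1) 1 ++ [(n : Int) - 1] := by
          have h2 : (((n + 1 : Nat) : Int) - 1) = ((n : Int) - 1) + 1 := by push_cast; omega
          rw [h2, PySem.List.pyRange_one_succ_right (by omega)]
        rw [hrange]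
        simp [hn]

-- A's fold characterised as a map over the ascending index range
lemma pvA_eq_map (src : List String) :
    model_lines src =
      (PySem.List.pyRange 0 (src.length : Int) 1).map
        (fun i => if i + 1 < (src.length : Int) then (i, some (i + 1)) else (i, none)) := by
  unfold model_lines
  rw [PySem.List.foldl_append_singleton_eq_map]
  have hmap :
      (PySem.List.enumerate src).map
        (fun p => if p.1 + 1 < (src.length : Int) then (p.1, some (p.1 + 1)) else (p.1, none)) =
      ((PySem.List.enumerate src).map (·.1)).map
        (fun i => if i + 1 < (src.length : Int) then (i, some (i + 1)) else (i, none)) := by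
    rw [List.map_map]; rfl
  rw [hmap, PySem.List.map_fst_enumerate]
  norm_num

-- the ascending map with the branch = branch-free prefix plus the final (n-1, none) element
lemma pvA_split (n : Nat) :
    (PySem.List.pyRange 0 (n : Int) 1).map
        (fun i => if i + 1 < (n : Int) then (i, some (i + 1)) else (i, none)) =
      (PySem.List.pyRange 0 ((n : Int) - 1) 1).map (fun i => (i, some (i + 1)))
        ++ (if n = 0 then [] else [((n : Int) - 1, (none : Option Int))]) := by
  by_cases hn : n = 0
  · subst hn; simp
  · have hsplit : PySem.List.pyRange 0 (n : Int) 1 =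
        PySem.List.pyRange 0 ((n : Int) - 1) 1 ++ [(n : Int) - 1] := by
      have h2 : (n : Int) = ((n : Int) - 1) + 1 := by omega
      conv_lhs => rw [h2]
      rw [PySem.List.pyRange_one_succ_right (by omega)]
    rw [hsplit]
    simp only [List.map_append, List.map_cons, List.map_nil, hn]
    congr 1
    · apply List.map_congr_left
      intro i hi
      have := (PySem.List.mem_pyRange_one.mp hi)
      rw [if_pos (by omega)]
    · rw [if_neg (by omega)]
      simp

-- ===== VERDICT (by name: the statement is the Claim_ definition above) =====
theorem model_lines_spec : Claim_equal_model_lines := by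
  intro src _
  unfold Spec_model_lines model_lines_alt
  rw [pvFold_eq_pairs]
  simp only [List.nil_append]
  rw [pvPairs_countdown src.length none, pvA_eq_map, pvA_split]
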